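-- pv_equiv track=rewrite | github.com/ThereAre12Months/MPL | docs/interpreter.py | splitCodeBlock
-- ===== SOURCE A (Python) =====
-- def splitCodeBlock(cb:str) -> list:
--     line = ""
--     lines = []
--     in_str = False
--     for char in cb:
--         if char == "'":
--             if in_str:
--                 lines.append(line)
--                 line = ""
--             in_str = not in_str
--         elif in_str:
--             line += char
--     return lines
-- ===== SOURCE B (Python) =====
-- def splitCodeBlock(cb: str) -> list:
--     def pairs(parts):
--         if len(parts) < 3:
--             return []
--         return [parts[1]] + pairs(parts[2:])
--     return pairs(cb.split("'"))
-- ===== Notes on version B (the rewrite author's own statement) =====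
-- stated objective: simpler
-- what changed: Replaced the character-by-character in_str state machine with a single split on the quote character followed by a short recursion that collects the enclosed part of each complete quote pair.
import Mathlib
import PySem

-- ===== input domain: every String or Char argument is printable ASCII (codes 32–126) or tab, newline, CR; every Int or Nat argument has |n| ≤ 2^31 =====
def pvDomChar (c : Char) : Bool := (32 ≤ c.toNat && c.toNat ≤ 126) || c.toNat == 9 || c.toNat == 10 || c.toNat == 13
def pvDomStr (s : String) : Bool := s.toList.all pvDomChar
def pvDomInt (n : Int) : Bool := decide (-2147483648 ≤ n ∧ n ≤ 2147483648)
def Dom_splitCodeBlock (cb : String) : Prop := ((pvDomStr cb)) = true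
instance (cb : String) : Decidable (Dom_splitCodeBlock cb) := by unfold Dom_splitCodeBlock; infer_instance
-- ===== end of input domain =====

-- B replaces A's per-character in_str state machine by one split on the quote plus a
-- pair-collecting recursion; objective: simpler (a timing run also measured a constant-factor speedup).

-- ===== PORT A =====
-- state = (line, lines, in_str); the loop body mirrors A's branches in order
def splitCodeBlockStep (st : List Char × List String × Bool) (c : Char) :
    List Char × List String × Bool :=
  match st with
  | (line, lines, in_str) =>
    if c = '\'' then
      if in_str then ([], lines ++ [String.ofList line], !in_str)
      else (line, lines, !in_str)
    else if in_str then (line ++ [c], lines, in_str)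
    else (line, lines, in_str)

def splitCodeBlock (cb : String) : List String :=
  (cb.toList.foldl splitCodeBlockStep ([], [], false)).2.1

-- ===== PORT B =====
-- pairs(parts): if len(parts) < 3 return []; else [parts[1]] + pairs(parts[2:])
def pvPairs : List (List Char) → List String
  | _ :: p :: q :: rest => String.ofList p :: pvPairs (q :: rest)
  | _ => []

-- cb.split("'") ported as Mathlib's List.splitOn on the code points (exact for a 1-char sep)
def splitCodeBlock_alt (cb : String) : List String :=
  pvPairs (cb.toList.splitOn '\'')

-- ===== PRECONDITION & SPEC =====
def Spec_splitCodeBlock (cb : String) (out : List String) : Prop := out = splitCodeBlock_alt cb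
instance (cb : String) (out : List String) : Decidable (Spec_splitCodeBlock cb out) := by unfold Spec_splitCodeBlock; infer_instance

-- ===== CLAIM (what is proved, stated in full; the proofs are below) =====
def Claim_equal_splitCodeBlock : Prop := ∀ (cb : String), Dom_splitCodeBlock cb → Spec_splitCodeBlock cb (splitCodeBlock cb)

-- ===== LEMMAS AND PROOFS =====

-- proof-only characterisation of A's remaining output from state (in_str, line) on the
-- still-unprocessed parts list
def pairsGo : Bool → List Char → List (List Char) → List String
  | _, _, [] => []
  | _, _, [_] => []
  | false, line, _ :: q :: rest => pairsGo true line (q :: rest)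
  | true, line, p :: q :: rest => String.ofList (line ++ p) :: pairsGo false [] (q :: rest)

theorem pvPairs_eq_pairsGo : ∀ ps : List (List Char), pvPairs ps = pairsGo false [] ps
  | [] => rfl
  | [_] => rfl
  | [_, _] => rfl
  | _ :: p :: q :: rest => by
      simp [pvPairs, pairsGo, pvPairs_eq_pairsGo (q :: rest)]

theorem foldl_step_eq (l : List Char) :
    ∀ (line : List Char) (lines : List String) (b : Bool),
      (l.foldl splitCodeBlockStep (line, lines, b)).2.1
        = lines ++ pairsGo b line (l.splitOn '\'') := by
  induction l with
  | nil =>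
      intro line lines b
      simp [List.splitOn_nil, pairsGo]
  | cons c cs ih =>
      intro line lines b
      have hne : cs.splitOn '\'' ≠ [] := List.splitOnP_ne_nil _ _
      rw [List.foldl_cons]
      by_cases hc : c = '\''
      · subst hc
        rw [show ('\'' :: cs).splitOn '\'' = [] :: cs.splitOn '\'' by
          simp [List.splitOn, List.splitOnP_cons]]
        cases b with
        | false =>
            have hs : splitCodeBlockStep (line, lines, false) '\'' = (line, lines, true) := rfl
            rw [hs]
            rw [ih]
            obtain ⟨p, qs, hpq⟩ := List.exists_cons_of_ne_nil hne
            rw [hpq]; rfl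
        | true =>
            have hs : splitCodeBlockStep (line, lines, true) '\'' = ([], lines ++ [String.ofList line], false) := rfl
            rw [hs]
            rw [ih]
            obtain ⟨p, qs, hpq⟩ := List.exists_cons_of_ne_nil hne
            rw [hpq]
            simp [pairsGo]
      · rw [show (c :: cs).splitOn '\'' = (cs.splitOn '\'').modifyHead (List.cons c) by
          simp [List.splitOn, List.splitOnP_cons, hc]]
        obtain ⟨p, qs, hpq⟩ := List.exists_cons_of_ne_nil hne
        rw [hpq, List.modifyHead_cons]
        cases b with
        | false =>
            have hs : splitCodeBlockStep (line, lines, false) c = (line, lines, false) := by simp [splitCodeBlockStep, hc]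
            rw [hs]
            rw [ih, hpq]
            cases qs with
            | nil => rfl
            | cons q rest => rfl
        | true =>
            have hs : splitCodeBlockStep (line, lines, true) c = (line ++ [c], lines, true) := by simp [splitCodeBlockStep, hc]
            rw [hs]
            rw [ih, hpq]
            cases qs with
            | nil => rfl
            | cons q rest => simp [pairsGo]

-- ===== VERDICT (by name: the statement is the Claim_ definition above) =====
theorem splitCodeBlock_spec : Claim_equal_splitCodeBlock := by
  intro cb _
  unfold Spec_splitCodeBlock splitCodeBlock splitCodeBlock_alt
  rw [foldl_step_eq, pvPairs_eq_pairsGo]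
  rfl
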